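-- pv_equiv track=rewrite | github.com/jasonhuh/UASCO | milk2/milk2.py | solve
-- ===== SOURCE A (Python) =====
-- def solve(ar):
--     # Combine overlapping events
--     def merge_events(ar):
--         ar = sorted(ar, key=lambda x: x[0]) # Sort by start time
--         stack = [ar[0]]
--         for _, event in enumerate(ar[1:]):
--             top = stack[-1]
--             if top[1] >= event[0]: # Events overlap
--                 if top[1] < event[1]:
--                     stack.pop()
--                     stack.append((top[0], event[1]))
--             else:
--                 stack.append(event)
--         return stack
--     finals = merge_events(ar)
--     max_range, max_space = finals[0][1] - finals[0][0], 0
--     for i, event in enumerate(finals[1:], 1):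
--         max_range = max(max_range, event[1] - event[0])
--         max_space = max(max_space, event[0] - finals[i-1][1])
--     return (max_range, max_space)
-- ===== SOURCE B (Python) =====
-- def solve(ar):
--     # Divide and conquer: recursively merge each half's intervals into a
--     # disjoint (start-ordered) group list, then combine the two group lists
--     # with a compressing two-pointer merge; no sort call at all.
--     def combine(gu, gv):
--         out = []
--         cur = None
--         i = j = 0
--         while i < len(gu) or j < len(gv):
--             if j >= len(gv) or (i < len(gu) and gu[i][0] <= gv[j][0]):
--                 s, e = gu[i]
--                 i += 1
--             else:
--                 s, e = gv[j]
--                 j += 1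
--             if cur is None:
--                 cur = (s, e)
--             elif cur[1] >= s:
--                 if cur[1] < e:
--                     cur = (cur[0], e)
--             else:
--                 out.append(cur)
--                 cur = (s, e)
--         if cur is not None:
--             out.append(cur)
--         return out
--
--     def rec(l):
--         if len(l) <= 1:
--             return l
--         m = len(l) // 2
--         return combine(rec(l[:m]), rec(l[m:]))
--
--     finals = rec(ar)
--     mr = finals[0][1] - finals[0][0]
--     ms = 0
--     for (_, pe), (s, e) in zip(finals, finals[1:]):
--         mr = max(mr, e - s)
--         ms = max(ms, s - pe)
--     return (mr, ms)
-- ===== Notes on version B (the rewrite author's own statement) =====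
-- stated objective: alternative
-- what changed: B replaces A's library-sort + stack-merge + indexed rescan by a divide-and-conquer interval union: it never calls sort, but recursively splits the list in half, merges each half into a disjoint start-ordered group list, and combines the two group lists with a compressing two-pointer merge before one final scan for the span and gap maxima.
import Mathlib
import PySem

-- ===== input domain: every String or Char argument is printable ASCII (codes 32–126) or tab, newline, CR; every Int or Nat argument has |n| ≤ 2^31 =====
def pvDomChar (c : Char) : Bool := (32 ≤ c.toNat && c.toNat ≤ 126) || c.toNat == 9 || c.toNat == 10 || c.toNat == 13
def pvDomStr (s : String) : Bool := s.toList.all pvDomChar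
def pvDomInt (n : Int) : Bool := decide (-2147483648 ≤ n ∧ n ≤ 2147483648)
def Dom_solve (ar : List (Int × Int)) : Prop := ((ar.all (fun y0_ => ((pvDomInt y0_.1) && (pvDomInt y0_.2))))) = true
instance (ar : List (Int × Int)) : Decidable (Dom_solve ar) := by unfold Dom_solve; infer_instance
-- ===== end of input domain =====

-- B replaces A's library-sort + stack-merge + indexed rescan by a divide-and-conquer interval
-- union (no sort call): split in half, merge each half recursively, combine the two disjoint
-- group lists with a compressing two-pointer merge (objective: alternative).

-- ===== PORT A =====
-- one iteration of A's merge loop; stack is always nonempty, so getLastD's default is never read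
def stepA (stack : List (Int × Int)) (event : Int × Int) : List (Int × Int) :=
  if (stack.getLastD (0, 0)).2 ≥ event.1 then
    if (stack.getLastD (0, 0)).2 < event.2 then
      stack.dropLast ++ [((stack.getLastD (0, 0)).1, event.2)]
    else stack
  else stack ++ [event]

-- A's second loop: walk finals keeping the previous element (finals[i-1])
def pass2 : (Int × Int) → List (Int × Int) → Int → Int → Int × Int
  | _, [], mr, ms => (mr, ms)
  | prev, e :: rest, mr, ms => pass2 e rest (max mr (e.2 - e.1)) (max ms (e.1 - prev.2))

def solve (ar : List (Int × Int)) : Int × Int :=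
  match PySem.List.sorted ar (fun x : Int × Int => x.1) false with
  | [] => (0, 0)          -- Python raises IndexError here; excluded by Pre_solve
  | a0 :: rest =>
    match rest.foldl stepA [a0] with
    | [] => (0, 0)        -- unreachable: the stack is never empty
    | f0 :: fs => pass2 f0 fs (f0.2 - f0.1) 0

-- ===== PORT B =====
-- one consumed interval of Source B's combine loop: (intervals appended to out, new cur)
def consumeB : Option (Int × Int) → (Int × Int) → List (Int × Int) × Option (Int × Int)
  | none, p => ([], some p)
  | some (cs, ce), (s, e) =>
    if ce ≥ s then
      (if ce < e then ([], some (cs, e)) else ([], some (cs, ce)))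
    else ([(cs, ce)], some (s, e))

-- Source B's combine: two-pointer walk over the two group lists, compressing into cur
def cmergeGo : Option (Int × Int) → List (Int × Int) → List (Int × Int) → List (Int × Int)
  | cur, [], [] => match cur with | none => [] | some c => [c]
  | cur, [], v :: gv => (consumeB cur v).1 ++ cmergeGo (consumeB cur v).2 [] gv
  | cur, u :: gu, [] => (consumeB cur u).1 ++ cmergeGo (consumeB cur u).2 gu []
  | cur, u :: gu, v :: gv =>
    if u.1 ≤ v.1 then (consumeB cur u).1 ++ cmergeGo (consumeB cur u).2 gu (v :: gv)
    else (consumeB cur v).1 ++ cmergeGo (consumeB cur v).2 (u :: gu) gv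
  termination_by _ gu gv => gu.length + gv.length

-- Source B's rec: split in half, merge each half, combine
def recB (l : List (Int × Int)) : List (Int × Int) :=
  if l.length ≤ 1 then l
  else cmergeGo none (recB (l.take (l.length / 2))) (recB (l.drop (l.length / 2)))
  termination_by l.length
  decreasing_by
  · simp only [List.length_take]; omega
  · simp only [List.length_drop]; omega

def solve_alt (ar : List (Int × Int)) : Int × Int :=
  match recB ar with
  | [] => (0, 0)          -- Python raises IndexError here; excluded by Pre_solve
  | f0 :: fs =>
    (List.zip (f0 :: fs) fs).foldl
      (fun (acc : Int × Int) pq => (max acc.1 (pq.2.2 - pq.2.1), max acc.2 (pq.2.1 - pq.1.2)))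
      (f0.2 - f0.1, 0)

-- ===== PRECONDITION & SPEC =====
-- Pre_ excludes only the empty list, on which both Pythons raise IndexError
def Pre_solve (ar : List (Int × Int)) : Prop := ar ≠ []
instance (ar : List (Int × Int)) : Decidable (Pre_solve ar) := by unfold Pre_solve; infer_instance
def pvWitness_solve : (List (Int × Int)) := [(0, 3), (6, 10), (2, 5)]
def Spec_solve (ar : List (Int × Int)) (out : Int × Int) : Prop := out = solve_alt ar
instance (ar : List (Int × Int)) (out : Int × Int) : Decidable (Spec_solve ar out) := by unfold Spec_solve; infer_instance

-- ===== CLAIM (what is proved, stated in full; the proofs are below) =====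
def Claim_equal_solve : Prop := ∀ (ar : List (Int × Int)), Dom_solve ar → Pre_solve ar → Spec_solve ar (solve ar)

-- ===== LEMMAS AND PROOFS =====

-- reference compressor: A's stack merge written as structural recursion on the sorted list,
-- carrying the current group (cs, ce)
def grp : Int → Int → List (Int × Int) → List (Int × Int)
  | cs, ce, [] => [(cs, ce)]
  | cs, ce, (s, e) :: t =>
    if ce ≥ s then (if ce < e then grp cs e t else grp cs ce t)
    else (cs, ce) :: grp s e t

def cmpG : List (Int × Int) → List (Int × Int)
  | [] => []
  | (s, e) :: t => grp s e t

-- stable merge by start (ties take the left list first)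
def smerge : List (Int × Int) → List (Int × Int) → List (Int × Int)
  | [], v => v
  | u, [] => u
  | x :: u, y :: v => if x.1 ≤ y.1 then x :: smerge u (y :: v) else y :: smerge (x :: u) v
  termination_by u v => u.length + v.length

-- sortedness by start
def SRT (w : List (Int × Int)) : Prop := w.Pairwise (fun p q => p.1 ≤ q.1)

-- ---- A-side: foldl stepA is grp ----
theorem stepA_ne_nil (S : List (Int × Int)) (ev : Int × Int) (h : S ≠ []) : stepA S ev ≠ [] := by
  unfold stepA; split_ifs <;> simp [h]

theorem stepA_append (P S : List (Int × Int)) (ev : Int × Int) (h : S ≠ []) :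
    stepA (P ++ S) ev = P ++ stepA S ev := by
  unfold stepA
  rw [List.getLastD_eq_getLast?, List.getLastD_eq_getLast?, List.getLast?_append_of_ne_nil _ h,
      List.dropLast_append_of_ne_nil h]
  split_ifs <;> simp

theorem foldl_stepA_append (l : List (Int × Int)) (P S : List (Int × Int)) (h : S ≠ []) :
    List.foldl stepA (P ++ S) l = P ++ List.foldl stepA S l := by
  induction l generalizing S with
  | nil => rfl
  | cons ev l ih =>
    simp only [List.foldl_cons, stepA_append P S ev h]
    exact ih _ (stepA_ne_nil S ev h)

theorem foldl_stepA_eq_grp (l : List (Int × Int)) (cs ce : Int) :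
    List.foldl stepA [(cs, ce)] l = grp cs ce l := by
  induction l generalizing cs ce with
  | nil => rfl
  | cons p t ih =>
    obtain ⟨s, e⟩ := p
    simp only [List.foldl_cons]
    by_cases h1 : ce ≥ s
    · by_cases h2 : ce < e
      · have hA : stepA [(cs, ce)] (s, e) = [(cs, e)] := by simp [stepA, h1, h2]
        rw [hA, ih, grp]; simp [h1, h2]
      · have hA : stepA [(cs, ce)] (s, e) = [(cs, ce)] := by simp [stepA, h1, h2]
        rw [hA, ih, grp]; simp [h1, h2]
    · have hA : stepA [(cs, ce)] (s, e) = [(cs, ce)] ++ [(s, e)] := by simp [stepA, h1]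
      rw [hA, foldl_stepA_append t [(cs, ce)] [(s, e)] (by simp), ih, grp]
      simp [h1]

-- grp absorbs an interval whose start is covered
theorem grp_absorb {ce s : Int} (cs e : Int) (t : List (Int × Int)) (h : ce ≥ s) :
    grp cs ce ((s, e) :: t) = grp cs (max ce e) t := by
  rw [grp]
  by_cases h2 : ce < e
  · simp [h, h2, max_eq_right h2.le]
  · simp [h, h2, max_eq_left (not_lt.mp h2)]

theorem grp_break {ce s : Int} (cs e : Int) (t : List (Int × Int)) (h : ¬ ce ≥ s) :
    grp cs ce ((s, e) :: t) = (cs, ce) :: grp s e t := by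
  rw [grp]; simp [h]

-- ---- answer phase: pass2 equals B's zip fold ----
theorem pass2_eq_zip_fold (l : List (Int × Int)) (prev : Int × Int) (mr ms : Int) :
    pass2 prev l mr ms
      = (List.zip (prev :: l) l).foldl
          (fun (acc : Int × Int) pq => (max acc.1 (pq.2.2 - pq.2.1), max acc.2 (pq.2.1 - pq.1.2)))
          (mr, ms) := by
  induction l generalizing prev mr ms with
  | nil => rfl
  | cons e rest ih => simpa [pass2, List.zip] using ih e _ _

-- ---- sort side: PySem's insertion sort is mergesort ----
-- inserting into a list is merging with a singleton
theorem smerge_nil_right (u : List (Int × Int)) : smerge u [] = u := by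
  cases u <;> simp [smerge]

theorem insertBy_eq_smerge_singleton (x : Int × Int) (w : List (Int × Int)) :
    PySem.List.insertBy (fun a b : Int × Int => decide (a.1 < b.1)) x w = smerge w [x] := by
  induction w with
  | nil => simp [PySem.List.insertBy, smerge]
  | cons h t ih =>
    rw [PySem.List.insertBy, smerge]
    by_cases hc : h.1 ≤ x.1
    · simp [not_lt.mpr hc, hc, ih]
    · simp [not_le.mp hc, not_le.mpr (not_le.mp hc), smerge_nil_right]

theorem insertBy_smerge (x : Int × Int) (su sv : List (Int × Int)) :
    PySem.List.insertBy (fun a b : Int × Int => decide (a.1 < b.1)) x (smerge su sv)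
      = smerge su (PySem.List.insertBy (fun a b : Int × Int => decide (a.1 < b.1)) x sv) := by
  induction su generalizing sv with
  | nil => simp [smerge]
  | cons l su' ihu =>
    induction sv with
    | nil =>
      rw [smerge_nil_right, insertBy_eq_smerge_singleton]
      have hx : PySem.List.insertBy (fun a b : Int × Int => decide (a.1 < b.1)) x [] = [x] := by
        rw [PySem.List.insertBy]
      rw [hx]
    | cons r sv' ihv =>
      by_cases hlr : l.1 ≤ r.1
      · rw [smerge, if_pos hlr]
        by_cases hxr : x.1 < r.1
        · have h1 : PySem.List.insertBy (fun a b : Int × Int => decide (a.1 < b.1)) x (r :: sv')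
              = x :: r :: sv' := by rw [PySem.List.insertBy]; simp [hxr]
          by_cases hxl : x.1 < l.1
          · have h2 : PySem.List.insertBy (fun a b : Int × Int => decide (a.1 < b.1)) x
                (l :: smerge su' (r :: sv')) = x :: l :: smerge su' (r :: sv') := by
              rw [PySem.List.insertBy]; simp [hxl]
            rw [h1, h2, smerge, if_neg (not_le.mpr hxl), smerge, if_pos hlr]
          · have h2 : PySem.List.insertBy (fun a b : Int × Int => decide (a.1 < b.1)) x
                (l :: smerge su' (r :: sv'))
                = l :: PySem.List.insertBy (fun a b : Int × Int => decide (a.1 < b.1)) x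
                    (smerge su' (r :: sv')) := by
              rw [PySem.List.insertBy]; simp [hxl]
            rw [h1, h2, ihu (r :: sv'), h1, smerge, if_pos (not_lt.mp hxl)]
        · have h1 : PySem.List.insertBy (fun a b : Int × Int => decide (a.1 < b.1)) x (r :: sv')
              = r :: PySem.List.insertBy (fun a b : Int × Int => decide (a.1 < b.1)) x sv' := by
            rw [PySem.List.insertBy]; simp [hxr]
          have hxl : ¬ x.1 < l.1 := fun hc => hxr (lt_of_lt_of_le hc hlr)
          have h2 : PySem.List.insertBy (fun a b : Int × Int => decide (a.1 < b.1)) x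
              (l :: smerge su' (r :: sv'))
              = l :: PySem.List.insertBy (fun a b : Int × Int => decide (a.1 < b.1)) x
                  (smerge su' (r :: sv')) := by
            rw [PySem.List.insertBy]; simp [hxl]
          rw [h1, h2, ihu (r :: sv'), h1, smerge, if_pos hlr]
      · rw [smerge, if_neg hlr]
        by_cases hxr : x.1 < r.1
        · have h1 : PySem.List.insertBy (fun a b : Int × Int => decide (a.1 < b.1)) x (r :: sv')
              = x :: r :: sv' := by rw [PySem.List.insertBy]; simp [hxr]
          have h2 : PySem.List.insertBy (fun a b : Int × Int => decide (a.1 < b.1)) x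
              (r :: smerge (l :: su') sv') = x :: r :: smerge (l :: su') sv' := by
            rw [PySem.List.insertBy]; simp [hxr]
          have hxl : x.1 < l.1 := lt_trans hxr (not_le.mp hlr)
          rw [h1, h2, smerge, if_neg (not_le.mpr hxl), smerge, if_neg hlr]
        · have h1 : PySem.List.insertBy (fun a b : Int × Int => decide (a.1 < b.1)) x (r :: sv')
              = r :: PySem.List.insertBy (fun a b : Int × Int => decide (a.1 < b.1)) x sv' := by
            rw [PySem.List.insertBy]; simp [hxr]
          have h2 : PySem.List.insertBy (fun a b : Int × Int => decide (a.1 < b.1)) x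
              (r :: smerge (l :: su') sv')
              = r :: PySem.List.insertBy (fun a b : Int × Int => decide (a.1 < b.1)) x
                  (smerge (l :: su') sv') := by
            rw [PySem.List.insertBy]; simp [hxr]
          rw [h1, h2, ihv, smerge, if_neg hlr]

theorem sorted_append_eq_smerge (u v : List (Int × Int)) :
    PySem.List.sorted (u ++ v) (fun x : Int × Int => x.1) false
      = smerge (PySem.List.sorted u (fun x : Int × Int => x.1) false)
               (PySem.List.sorted v (fun x : Int × Int => x.1) false) := by
  induction v using List.reverseRecOn with
  | nil => simp [smerge_nil_right, PySem.List.sorted]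
  | append_singleton v' x ih =>
    rw [PySem.List.sorted_eq_foldl_insertBy, ← List.append_assoc, List.foldl_append,
        List.foldl_cons, List.foldl_nil, ← PySem.List.sorted_eq_foldl_insertBy, ih,
        insertBy_smerge,
        PySem.List.sorted_eq_foldl_insertBy (v' ++ [x]), List.foldl_append,
        List.foldl_cons, List.foldl_nil, ← PySem.List.sorted_eq_foldl_insertBy]

-- ---- D&C side: compressing commutes with merging ----
-- grp only looks at the tail through some seed: equal tails under all seeds can be swapped
theorem grp_congr_suffix (P X Y : List (Int × Int))
    (h : ∀ cs ce, grp cs ce X = grp cs ce Y) :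
    ∀ cs ce, grp cs ce (P ++ X) = grp cs ce (P ++ Y) := by
  induction P with
  | nil => exact h
  | cons p P' ih =>
    obtain ⟨s, e⟩ := p
    intro cs ce
    rw [List.cons_append, List.cons_append, grp, grp]
    split_ifs <;> simp [ih]

-- a covered interval (s', e') can be folded into the running end m across a low-start mid
theorem grp_coreAux (mid : List (Int × Int)) (cs m s' e' : Int) (R : List (Int × Int))
    (hm : s' ≤ m) (hmid : ∀ p ∈ mid, p.1 ≤ m) :
    grp cs m (mid ++ (s', e') :: R) = grp cs (max m e') (mid ++ R) := by
  induction mid generalizing m with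
  | nil => simpa using grp_absorb cs e' R hm
  | cons p mid' ih =>
    obtain ⟨t, f⟩ := p
    have ht : t ≤ m := hmid (t, f) (List.mem_cons_self ..)
    rw [List.cons_append, List.cons_append, grp_absorb cs f _ ht,
        grp_absorb cs f _ (le_trans ht (le_max_left m e'))]
    rw [ih (max m f) (le_trans hm (le_max_left m f))
        (fun p hp => le_trans (hmid p (List.mem_cons_of_mem _ hp)) (le_max_left m f))]
    rw [max_right_comm]

-- merging a pre-compressed pair equals merging the pair, under any seed
theorem grp_seedcore (s e s' e' : Int) (mid W : List (Int × Int))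
    (he : s' ≤ e) (hmid : ∀ p ∈ mid, p.1 ≤ s') :
    ∀ cs ce, grp cs ce ((s, e) :: (mid ++ (s', e') :: W))
      = grp cs ce ((s, max e e') :: (mid ++ W)) := by
  intro cs ce
  by_cases hce : ce ≥ s
  · rw [grp_absorb cs e _ hce, grp_absorb cs (max e e') _ hce,
        grp_coreAux mid cs (max ce e) s' e' W (le_trans he (le_max_right ce e))
          (fun p hp => le_trans (hmid p hp) (le_trans he (le_max_right ce e))),
        max_assoc]
  · rw [grp_break cs e _ hce, grp_break cs (max e e') _ hce,
        grp_coreAux mid s e s' e' W he (fun p hp => le_trans (hmid p hp) he)]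

theorem grp_congr_cons (X Y : List (Int × Int)) (h : ∀ cs ce, grp cs ce X = grp cs ce Y)
    (p : Int × Int) : ∀ cs ce, grp cs ce (p :: X) = grp cs ce (p :: Y) := by
  obtain ⟨s, e⟩ := p
  intro cs ce
  rw [grp, grp]
  split_ifs <;> simp [h]

-- smerge decompositions
theorem smerge_cons_left (xs xe : Int) (u v : List (Int × Int)) :
    smerge ((xs, xe) :: u) v
      = v.takeWhile (fun p => p.1 < xs) ++ (xs, xe) :: smerge u (v.dropWhile (fun p => p.1 < xs)) := by
  induction v with
  | nil => simp [smerge_nil_right]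
  | cons y v' ih =>
    rw [smerge]
    by_cases hxy : xs ≤ y.1
    · rw [if_pos hxy, List.takeWhile_cons, List.dropWhile_cons]
      simp [not_lt.mpr hxy]
    · rw [if_neg hxy, List.takeWhile_cons, List.dropWhile_cons]
      simp only [not_le.mp hxy, if_pos, decide_true, List.cons_append]
      rw [ih]

theorem smerge_cons_right (ys ye : Int) (u v : List (Int × Int)) :
    smerge u ((ys, ye) :: v)
      = u.takeWhile (fun p => p.1 ≤ ys) ++ (ys, ye) :: smerge (u.dropWhile (fun p => p.1 ≤ ys)) v := by
  induction u with
  | nil => simp [smerge]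
  | cons x u' ih =>
    rw [smerge]
    by_cases hxy : x.1 ≤ ys
    · rw [if_pos hxy, List.takeWhile_cons, List.dropWhile_cons]
      simp only [hxy, decide_true, if_pos, List.cons_append]
      rw [ih]
    · rw [if_neg hxy, List.takeWhile_cons, List.dropWhile_cons]
      simp [hxy]

theorem smerge_skip_right (A2 : List (Int × Int)) (a v2 : List (Int × Int))
    (h : ∀ p ∈ A2, ∀ q ∈ a, p.1 < q.1) :
    smerge a (A2 ++ v2) = A2 ++ smerge a v2 := by
  induction A2 with
  | nil => rfl
  | cons p A2' ih =>
    cases a with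
    | nil => simp [smerge]
    | cons q a' =>
      rw [List.cons_append, smerge,
          if_neg (not_le.mpr (h p (List.mem_cons_self ..) q (List.mem_cons_self ..))),
          List.cons_append,
          ih (fun p' hp' q' hq' => h p' (List.mem_cons_of_mem _ hp') q' hq')]

theorem smerge_skip_left (U2 : List (Int × Int)) (b u2 : List (Int × Int))
    (h : ∀ p ∈ U2, ∀ q ∈ b, p.1 ≤ q.1) :
    smerge (U2 ++ u2) b = U2 ++ smerge u2 b := by
  induction U2 with
  | nil => rfl
  | cons p U2' ih =>
    cases b with
    | nil => rw [smerge_nil_right, smerge_nil_right, List.cons_append]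
    | cons y b' =>
      rw [List.cons_append, smerge,
          if_pos (h p (List.mem_cons_self ..) y (List.mem_cons_self ..)),
          List.cons_append,
          ih (fun p' hp' q' hq' => h p' (List.mem_cons_of_mem _ hp') q' hq')]

-- CORE: an absorption step inside the left list commutes with smerge
theorem grp_core_left (s e s' e' : Int) (a'' v : List (Int × Int))
    (he : s' ≤ e) (hlob : ∀ q ∈ a'', s' ≤ q.1) :
    ∀ cs ce, grp cs ce (smerge ((s, e) :: (s', e') :: a'') v)
      = grp cs ce (smerge ((s, max e e') :: a'') v) := by
  intro cs ce
  rw [smerge_cons_left s e ((s', e') :: a'') v,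
      smerge_cons_left s (max e e') a'' v,
      smerge_cons_left s' e' a'' (v.dropWhile (fun p => p.1 < s))]
  have hskip : smerge a'' (v.dropWhile (fun p => p.1 < s))
      = ((v.dropWhile (fun p => p.1 < s)).takeWhile (fun p => p.1 < s'))
        ++ smerge a'' ((v.dropWhile (fun p => p.1 < s)).dropWhile (fun p => p.1 < s')) := by
    conv_lhs => rw [← List.takeWhile_append_dropWhile
      (p := fun p : Int × Int => decide (p.1 < s')) (l := v.dropWhile (fun p => p.1 < s))]
    exact smerge_skip_right _ a'' _
      (fun p hp q hq => lt_of_lt_of_le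
        (by simpa using List.mem_takeWhile_imp hp) (hlob q hq))
  rw [hskip]
  exact grp_congr_suffix (v.takeWhile (fun p => p.1 < s)) _ _
    (grp_seedcore s e s' e' _ _ he
      (fun p hp => le_of_lt (by simpa using List.mem_takeWhile_imp hp))) cs ce

theorem grp_core_right (t f t' f' : Int) (b'' u : List (Int × Int))
    (hf : t' ≤ f) (hlob : ∀ q ∈ b'', t' ≤ q.1) :
    ∀ cs ce, grp cs ce (smerge u ((t, f) :: (t', f') :: b''))
      = grp cs ce (smerge u ((t, max f f') :: b'')) := by
  intro cs ce
  rw [smerge_cons_right t f u ((t', f') :: b''),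
      smerge_cons_right t (max f f') u b'',
      smerge_cons_right t' f' (u.dropWhile (fun p => p.1 ≤ t)) b'']
  have hskip : smerge (u.dropWhile (fun p => p.1 ≤ t)) b''
      = ((u.dropWhile (fun p => p.1 ≤ t)).takeWhile (fun p => p.1 ≤ t'))
        ++ smerge ((u.dropWhile (fun p => p.1 ≤ t)).dropWhile (fun p => p.1 ≤ t')) b'' := by
    conv_lhs => rw [← List.takeWhile_append_dropWhile
      (p := fun p : Int × Int => decide (p.1 ≤ t')) (l := u.dropWhile (fun p => p.1 ≤ t))]
    exact smerge_skip_left _ b'' _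
      (fun p hp q hq => le_trans
        (by simpa using List.mem_takeWhile_imp hp) (hlob q hq))
  rw [hskip]
  exact grp_congr_suffix (u.takeWhile (fun p => p.1 ≤ t)) _ _
    (grp_seedcore t f t' f' _ _ hf
      (fun p hp => by simpa using List.mem_takeWhile_imp hp)) cs ce

-- MAIN: pre-compressing the left list does not change the compressed merge, under any seed
theorem grp_smerge_cmp_left (a : List (Int × Int)) :
    ∀ (s e : Int) (v : List (Int × Int)), SRT ((s, e) :: a) →
    ∀ cs ce, grp cs ce (smerge (grp s e a) v) = grp cs ce (smerge ((s, e) :: a) v) := by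
  induction a with
  | nil => intro s e v _ cs ce; rfl
  | cons p a'' ih =>
    obtain ⟨s', e'⟩ := p
    intro s e v hsrt cs ce
    have hsrt' : SRT ((s', e') :: a'') := (List.pairwise_cons.mp hsrt).2
    by_cases habs : e ≥ s'
    · have hlob : ∀ q ∈ a'', s' ≤ q.1 := fun q hq => (List.pairwise_cons.mp hsrt').1 q hq
      have hsrt'' : SRT ((s, max e e') :: a'') := by
        rw [SRT, List.pairwise_cons] at hsrt ⊢
        exact ⟨fun q hq => hsrt.1 q (List.mem_cons_of_mem _ hq),
               (List.pairwise_cons.mp hsrt').2⟩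
      rw [grp_absorb s e' a'' habs, ih s (max e e') v hsrt'']
      exact (grp_core_left s e s' e' a'' v habs hlob cs ce).symm
    · rw [grp_break s e' a'' habs,
          smerge_cons_left s e (grp s' e' a'') v,
          smerge_cons_left s e ((s', e') :: a'') v]
      exact grp_congr_suffix (v.takeWhile fun p => p.1 < s) _ _
        (grp_congr_cons _ _ (ih s' e' (v.dropWhile fun p => p.1 < s) hsrt') (s, e)) cs ce

theorem grp_smerge_cmp_right (b : List (Int × Int)) :
    ∀ (t f : Int) (u : List (Int × Int)), SRT ((t, f) :: b) →
    ∀ cs ce, grp cs ce (smerge u (grp t f b)) = grp cs ce (smerge u ((t, f) :: b)) := by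
  induction b with
  | nil => intro t f u _ cs ce; rfl
  | cons p b'' ih =>
    obtain ⟨t', f'⟩ := p
    intro t f u hsrt cs ce
    have hsrt' : SRT ((t', f') :: b'') := (List.pairwise_cons.mp hsrt).2
    by_cases habs : f ≥ t'
    · have hlob : ∀ q ∈ b'', t' ≤ q.1 := fun q hq => (List.pairwise_cons.mp hsrt').1 q hq
      have hsrt'' : SRT ((t, max f f') :: b'') := by
        rw [SRT, List.pairwise_cons] at hsrt ⊢
        exact ⟨fun q hq => hsrt.1 q (List.mem_cons_of_mem _ hq),
               (List.pairwise_cons.mp hsrt').2⟩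
      rw [grp_absorb t f' b'' habs, ih t (max f f') u hsrt'']
      exact (grp_core_right t f t' f' b'' u habs hlob cs ce).symm
    · rw [grp_break t f' b'' habs,
          smerge_cons_right t f u (grp t' f' b''),
          smerge_cons_right t f u ((t', f') :: b'')]
      exact grp_congr_suffix (u.takeWhile fun p => p.1 ≤ t) _ _
        (grp_congr_cons _ _ (ih t' f' (u.dropWhile fun p => p.1 ≤ t) hsrt') (t, f)) cs ce

theorem cmp_smerge_cmp_left (a : List (Int × Int)) :
    ∀ (s e : Int) (v : List (Int × Int)), SRT ((s, e) :: a) →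
    cmpG (smerge (grp s e a) v) = cmpG (smerge ((s, e) :: a) v) := by
  induction a with
  | nil => intro s e v _; rfl
  | cons p a'' ih =>
    obtain ⟨s', e'⟩ := p
    intro s e v hsrt
    have hsrt' : SRT ((s', e') :: a'') := (List.pairwise_cons.mp hsrt).2
    by_cases habs : e ≥ s'
    · have hlob : ∀ q ∈ a'', s' ≤ q.1 := fun q hq => (List.pairwise_cons.mp hsrt').1 q hq
      have hsrt'' : SRT ((s, max e e') :: a'') := by
        rw [SRT, List.pairwise_cons] at hsrt ⊢
        exact ⟨fun q hq => hsrt.1 q (List.mem_cons_of_mem _ hq),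
               (List.pairwise_cons.mp hsrt').2⟩
      rw [grp_absorb s e' a'' habs, ih s (max e e') v hsrt'',
          smerge_cons_left s (max e e') a'' v,
          smerge_cons_left s e ((s', e') :: a'') v,
          smerge_cons_left s' e' a'' (v.dropWhile fun p => p.1 < s)]
      have hskip : smerge a'' (v.dropWhile (fun p => p.1 < s))
          = ((v.dropWhile (fun p => p.1 < s)).takeWhile (fun p => p.1 < s'))
            ++ smerge a'' ((v.dropWhile (fun p => p.1 < s)).dropWhile (fun p => p.1 < s')) := by
        conv_lhs => rw [← List.takeWhile_append_dropWhile
          (p := fun p : Int × Int => decide (p.1 < s')) (l := v.dropWhile (fun p => p.1 < s))]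
        exact smerge_skip_right _ a'' _
          (fun p hp q hq => lt_of_lt_of_le
            (by simpa using List.mem_takeWhile_imp hp) (hlob q hq))
      rw [hskip]
      have hmid : ∀ p ∈ (v.dropWhile (fun p : Int × Int => p.1 < s)).takeWhile
          (fun p : Int × Int => p.1 < s'), p.1 ≤ s' :=
        fun p hp => le_of_lt (by simpa using List.mem_takeWhile_imp hp)
      rcases hv : v.takeWhile (fun p : Int × Int => p.1 < s) with _ | ⟨h, A1'⟩
      · show grp s (max e e') _ = grp s e _
        exact (grp_coreAux _ s e s' e' _ habs
          (fun p hp => le_trans (hmid p hp) habs)).symm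
      · obtain ⟨h1, h2⟩ := h
        show grp h1 h2 _ = grp h1 h2 _
        exact (grp_congr_suffix A1' _ _
          (grp_seedcore s e s' e' _ _ habs hmid) h1 h2).symm
    · rw [grp_break s e' a'' habs,
          smerge_cons_left s e (grp s' e' a'') v,
          smerge_cons_left s e ((s', e') :: a'') v]
      rcases hv : v.takeWhile (fun p : Int × Int => p.1 < s) with _ | ⟨h, A1'⟩
      · show grp s e _ = grp s e _
        exact grp_smerge_cmp_left a'' s' e' (v.dropWhile fun p => p.1 < s) hsrt' s e
      · obtain ⟨h1, h2⟩ := h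
        show grp h1 h2 _ = grp h1 h2 _
        exact grp_congr_suffix A1' _ _
          (grp_congr_cons _ _
            (grp_smerge_cmp_left a'' s' e' (v.dropWhile fun p => p.1 < s) hsrt') (s, e)) h1 h2

theorem cmp_smerge_cmp_right (b : List (Int × Int)) :
    ∀ (t f : Int) (u : List (Int × Int)), SRT ((t, f) :: b) →
    cmpG (smerge u (grp t f b)) = cmpG (smerge u ((t, f) :: b)) := by
  induction b with
  | nil => intro t f u _; rfl
  | cons p b'' ih =>
    obtain ⟨t', f'⟩ := p
    intro t f u hsrt
    have hsrt' : SRT ((t', f') :: b'') := (List.pairwise_cons.mp hsrt).2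
    by_cases habs : f ≥ t'
    · have hlob : ∀ q ∈ b'', t' ≤ q.1 := fun q hq => (List.pairwise_cons.mp hsrt').1 q hq
      have hsrt'' : SRT ((t, max f f') :: b'') := by
        rw [SRT, List.pairwise_cons] at hsrt ⊢
        exact ⟨fun q hq => hsrt.1 q (List.mem_cons_of_mem _ hq),
               (List.pairwise_cons.mp hsrt').2⟩
      rw [grp_absorb t f' b'' habs, ih t (max f f') u hsrt'',
          smerge_cons_right t (max f f') u b'',
          smerge_cons_right t f u ((t', f') :: b''),
          smerge_cons_right t' f' (u.dropWhile fun p => p.1 ≤ t) b'']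
      have hskip : smerge (u.dropWhile (fun p => p.1 ≤ t)) b''
          = ((u.dropWhile (fun p => p.1 ≤ t)).takeWhile (fun p => p.1 ≤ t'))
            ++ smerge ((u.dropWhile (fun p => p.1 ≤ t)).dropWhile (fun p => p.1 ≤ t')) b'' := by
        conv_lhs => rw [← List.takeWhile_append_dropWhile
          (p := fun p : Int × Int => decide (p.1 ≤ t')) (l := u.dropWhile (fun p => p.1 ≤ t))]
        exact smerge_skip_left _ b'' _
          (fun p hp q hq => le_trans
            (by simpa using List.mem_takeWhile_imp hp) (hlob q hq))
      rw [hskip]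
      have hmid : ∀ p ∈ (u.dropWhile (fun p : Int × Int => p.1 ≤ t)).takeWhile
          (fun p : Int × Int => p.1 ≤ t'), p.1 ≤ t' :=
        fun p hp => by simpa using List.mem_takeWhile_imp hp
      rcases hu : u.takeWhile (fun p : Int × Int => p.1 ≤ t) with _ | ⟨h, U1'⟩
      · show grp t (max f f') _ = grp t f _
        exact (grp_coreAux _ t f t' f' _ habs
          (fun p hp => le_trans (hmid p hp) habs)).symm
      · obtain ⟨h1, h2⟩ := h
        show grp h1 h2 _ = grp h1 h2 _
        exact (grp_congr_suffix U1' _ _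
          (grp_seedcore t f t' f' _ _ habs hmid) h1 h2).symm
    · rw [grp_break t f' b'' habs,
          smerge_cons_right t f u (grp t' f' b''),
          smerge_cons_right t f u ((t', f') :: b'')]
      rcases hu : u.takeWhile (fun p : Int × Int => p.1 ≤ t) with _ | ⟨h, U1'⟩
      · show grp t f _ = grp t f _
        exact grp_smerge_cmp_right b'' t' f' (u.dropWhile fun p => p.1 ≤ t) hsrt' t f
      · obtain ⟨h1, h2⟩ := h
        show grp h1 h2 _ = grp h1 h2 _
        exact grp_congr_suffix U1' _ _
          (grp_congr_cons _ _
            (grp_smerge_cmp_right b'' t' f' (u.dropWhile fun p => p.1 ≤ t) hsrt') (t, f)) h1 h2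

-- ---- B port bridges ----
-- the compressed tail as a function of the pending current interval
def pend : Option (Int × Int) → List (Int × Int) → List (Int × Int)
  | none, w => cmpG w
  | some (cs, ce), w => grp cs ce w

theorem consumeB_glue (cur : Option (Int × Int)) (p : Int × Int) (w : List (Int × Int)) :
    (consumeB cur p).1 ++ pend (consumeB cur p).2 w = pend cur (p :: w) := by
  obtain ⟨s, e⟩ := p
  cases cur with
  | none => rfl
  | some c =>
    obtain ⟨cs, ce⟩ := c
    by_cases h1 : ce ≥ s
    · by_cases h2 : ce < e
      · simp [consumeB, h1, h2, pend, grp]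
      · simp [consumeB, h1, h2, pend, grp]
    · simp [consumeB, h1, pend, grp]

theorem cmergeGo_pend (cur : Option (Int × Int)) (gu gv : List (Int × Int)) :
    cmergeGo cur gu gv = pend cur (smerge gu gv) := by
  induction cur, gu, gv using cmergeGo.induct with
  | case1 => rw [cmergeGo]; simp [smerge, pend, cmpG]
  | case2 c => obtain ⟨cs, ce⟩ := c; rw [cmergeGo]; simp [smerge, pend, grp]
  | case3 cur v gv ih =>
    rw [cmergeGo, ih, consumeB_glue]; simp [smerge]
  | case4 cur u gu ih =>
    rw [cmergeGo, ih, consumeB_glue, smerge_nil_right, smerge_nil_right]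
  | case5 cur u gu v gv huv ih =>
    rw [cmergeGo, if_pos huv, ih, consumeB_glue, smerge, if_pos huv]
  | case6 cur u gu v gv huv ih =>
    rw [cmergeGo, if_neg huv, ih, consumeB_glue, smerge, if_neg huv]

theorem cmergeGo_none (gu gv : List (Int × Int)) :
    cmergeGo none gu gv = cmpG (smerge gu gv) :=
  cmergeGo_pend none gu gv

theorem recB_eq_cmp_sorted (l : List (Int × Int)) :
    recB l = cmpG (PySem.List.sorted l (fun x : Int × Int => x.1) false) := by
  induction l using recB.induct with
  | case1 l hlen =>
    rw [recB, if_pos hlen]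
    match l, hlen with
    | [], _ => rfl
    | [x], _ =>
      have : PySem.List.sorted [x] (fun x : Int × Int => x.1) false = [x] :=
        PySem.List.sorted_eq_self_of_pairwise _ _ (by simp)
      rw [this]
      obtain ⟨s, e⟩ := x
      rfl
  | case2 l hlen ih1 ih2 =>
    rw [recB, if_neg hlen, cmergeGo_none, ih1, ih2]
    have hu : PySem.List.sorted (l.take (l.length / 2)) (fun x : Int × Int => x.1) false ≠ [] := by
      rw [Ne, PySem.List.sorted_eq_nil_iff, ← List.length_eq_zero_iff, List.length_take]
      omega
    have hv : PySem.List.sorted (l.drop (l.length / 2)) (fun x : Int × Int => x.1) false ≠ [] := by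
      rw [Ne, PySem.List.sorted_eq_nil_iff, ← List.length_eq_zero_iff, List.length_drop]
      omega
    rcases hsu : PySem.List.sorted (l.take (l.length / 2)) (fun x : Int × Int => x.1) false
      with _ | ⟨⟨s, e⟩, A'⟩
    · exact absurd hsu hu
    rcases hsv : PySem.List.sorted (l.drop (l.length / 2)) (fun x : Int × Int => x.1) false
      with _ | ⟨⟨t, f⟩, B'⟩
    · exact absurd hsv hv
    have hsrtu : SRT ((s, e) :: A') := by
      rw [← hsu]; exact PySem.List.sorted_pairwise _ _
    have hsrtv : SRT ((t, f) :: B') := by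
      rw [← hsv]; exact PySem.List.sorted_pairwise _ _
    show cmpG (smerge (grp s e A') (grp t f B')) = _
    rw [cmp_smerge_cmp_left A' s e (grp t f B') hsrtu,
        cmp_smerge_cmp_right B' t f ((s, e) :: A') hsrtv,
        ← hsu, ← hsv, ← sorted_append_eq_smerge, List.take_append_drop]

-- ===== VERDICT (by name: the statement is the Claim_ definition above) =====
theorem solve_spec : Claim_equal_solve := by
  intro ar _ _
  unfold Spec_solve solve solve_alt
  rw [recB_eq_cmp_sorted]
  cases h : PySem.List.sorted ar (fun x : Int × Int => x.1) false with
  | nil => rfl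
  | cons a0 rest =>
    obtain ⟨s, e⟩ := a0
    show (match List.foldl stepA [(s, e)] rest with
      | [] => ((0 : Int), (0 : Int))
      | f0 :: fs => pass2 f0 fs (f0.2 - f0.1) 0)
      = (match grp s e rest with
      | [] => ((0 : Int), (0 : Int))
      | f0 :: fs =>
        (List.zip (f0 :: fs) fs).foldl
          (fun (acc : Int × Int) pq => (max acc.1 (pq.2.2 - pq.2.1), max acc.2 (pq.2.1 - pq.1.2)))
          (f0.2 - f0.1, 0))
    rw [foldl_stepA_eq_grp]
    cases hg : grp s e rest with
    | nil => rfl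
    | cons f0 fs => exact pass2_eq_zip_fold fs f0 _ _
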